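-- pv_equiv track=rewrite | github.com/mukerem/WebScrapping | codeforces/archive/Rotate,_Flip_and_Zoom_523A.py | rotate_flip_zoom
-- ===== SOURCE A (Python) =====
-- from typing import List
--
-- def rotate_flip_zoom(w: int, h: int, a: List[str]) -> List[str]:
--     new = [ ['.'] * (2*h) for i in range(2*w)] # create new array to store the image the new dimension is 2h by 2w
--     for i in range(h):
--         for j in range(w):
--             new[2*j+1][2*i+1] = a[i][j]
--             new[2*j+1][2*i] = a[i][j]
--             new[2*j][2*i+1] = a[i][j]
--             new[2*j][2*i] = a[i][j]
--     return [''.join(row) for row in new] # concatinate each row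
-- ===== SOURCE B (Python) =====
-- def rotate_flip_zoom(w, h, a):
--     # Build each output row directly by reading input column j top-to-bottom,
--     # doubling every character, and emitting the row twice (no intermediate grid).
--     res = []
--     for j in range(w):
--         row = ''.join(a[i][j] * 2 for i in range(h))
--         res.append(row)
--         res.append(row)
--     return res
-- ===== Notes on version B (the rewrite author's own statement) =====
-- stated objective: simpler
-- what changed: B emits each output row directly by reading input column j top-to-bottom and doubling characters, appending the row twice, instead of allocating a 2w-by-2h '.'-filled grid and scatter-writing four cells per input pixel then joining rows.
import Mathlib
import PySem

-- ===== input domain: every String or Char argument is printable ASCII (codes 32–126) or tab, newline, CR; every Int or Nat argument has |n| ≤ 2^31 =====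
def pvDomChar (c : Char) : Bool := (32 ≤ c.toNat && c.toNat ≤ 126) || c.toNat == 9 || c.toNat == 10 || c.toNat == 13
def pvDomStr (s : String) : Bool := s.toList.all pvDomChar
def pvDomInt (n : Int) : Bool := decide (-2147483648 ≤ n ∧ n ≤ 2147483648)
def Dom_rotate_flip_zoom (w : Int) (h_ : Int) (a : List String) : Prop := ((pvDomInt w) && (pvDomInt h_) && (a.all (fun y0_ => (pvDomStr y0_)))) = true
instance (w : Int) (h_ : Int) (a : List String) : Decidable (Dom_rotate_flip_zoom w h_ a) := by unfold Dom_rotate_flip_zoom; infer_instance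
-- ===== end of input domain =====

-- B builds each doubled output row directly from input column j and appends it twice,
-- instead of A's '.'-filled 2w×2h grid scatter-written four cells per pixel (objective: simpler).

-- a[i][j] for Int indices; the `.getD '.'` default is never reached inside Pre_ (Python raises there)
def pyAt (a : List String) (i j : Int) : Char :=
  (((PySem.List.pyGet? a i).map String.toList).bind (fun s => PySem.List.pyGet? s j)).getD '.'

-- ===== PORT A =====
-- the four cell assignments of A's inner loop body (new[r][c] = x is get-row-then-set;
-- the row/column indices are always in range here, so getD/set is exact)
def bodyA (a : List String) (i : Int) (g : List (List Char)) (j : Int) : List (List Char) :=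
  let c := pyAt a i j
  let g := g.set (2*j+1).toNat ((g.getD (2*j+1).toNat []).set (2*i+1).toNat c)
  let g := g.set (2*j+1).toNat ((g.getD (2*j+1).toNat []).set (2*i).toNat c)
  let g := g.set (2*j).toNat ((g.getD (2*j).toNat []).set (2*i+1).toNat c)
  g.set (2*j).toNat ((g.getD (2*j).toNat []).set (2*i).toNat c)

def rotate_flip_zoom (w : Int) (h_ : Int) (a : List String) : List String :=
  -- new = [['.'] * (2*h) for i in range(2*w)]
  let new0 : List (List Char) :=
    (PySem.List.pyRange 0 (2*w) 1).map (fun _ => List.replicate (2*h_).toNat '.')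
  -- for i in range(h): for j in range(w): four assignments
  let new : List (List Char) :=
    (PySem.List.pyRange 0 h_ 1).foldl (fun g i =>
      (PySem.List.pyRange 0 w 1).foldl (bodyA a i) g) new0
  -- return [''.join(row) for row in new]
  new.map (fun row => String.ofList row)

-- ===== PORT B =====
def rotate_flip_zoom_alt (w : Int) (h_ : Int) (a : List String) : List String :=
  (PySem.List.pyRange 0 w 1).foldl (fun res j =>
    -- row = ''.join(a[i][j]*2 for i in range(h))
    let row := String.ofList ((PySem.List.pyRange 0 h_ 1).flatMap (fun i => [pyAt a i j, pyAt a i j]))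
    res ++ [row, row]) []

-- ===== PRECONDITION & SPEC =====
-- Pre_ is exactly where Python A returns: when both dimensions are positive, the first h rows
-- must exist and each be at least w characters long (otherwise a[i][j] raises IndexError).
def Pre_rotate_flip_zoom (w : Int) (h_ : Int) (a : List String) : Prop :=
  0 < w → 0 < h_ → (h_ ≤ (a.length : Int) ∧ ∀ s ∈ a.take h_.toNat, w ≤ (s.toList.length : Int))
instance (w : Int) (h_ : Int) (a : List String) : Decidable (Pre_rotate_flip_zoom w h_ a) := by
  unfold Pre_rotate_flip_zoom; infer_instance

def pvWitness_rotate_flip_zoom : Int × Int × List String := (2, 1, ["xy"])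

def Spec_rotate_flip_zoom (w : Int) (h_ : Int) (a : List String) (out : List String) : Prop := out = rotate_flip_zoom_alt w h_ a
instance (w : Int) (h_ : Int) (a : List String) (out : List String) : Decidable (Spec_rotate_flip_zoom w h_ a out) := by unfold Spec_rotate_flip_zoom; infer_instance

-- ===== CLAIM (what is proved, stated in full; the proofs are below) =====
def Claim_equal_rotate_flip_zoom : Prop := ∀ (w : Int) (h_ : Int) (a : List String), Dom_rotate_flip_zoom w h_ a → Pre_rotate_flip_zoom w h_ a → Spec_rotate_flip_zoom w h_ a (rotate_flip_zoom w h_ a)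

-- ===== LEMMAS AND PROOFS =====

-- each grid row duplicated (A's rows 2j and 2j+1 always hold the same list)
def pvExpand (P : List (List Char)) : List (List Char) := P.flatMap (fun r => [r, r])

-- row 2j / 2j+1 of A's grid after the first m outer iterations (H = h.toNat)
def pvRow (a : List String) (H m j : Nat) : List Char :=
  ((List.range m).map (fun i => pyAt a i j)).flatMap (fun c => [c, c]) ++ List.replicate (2*(H-m)) '.'

-- net effect of one inner-loop body on one (duplicated) row: set columns p+1 then p to c
def pvUpd (c : Char) (p : Nat) (row : List Char) : List Char := (row.set (p+1) c).set p c

-- A's inner body, naturalized to Nat indices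
def pvBody (a : List String) (m : Nat) (g : List (List Char)) (j : Nat) : List (List Char) :=
  let c := pyAt a m j
  let g := g.set (2*j+1) ((g.getD (2*j+1) []).set (2*m+1) c)
  let g := g.set (2*j+1) ((g.getD (2*j+1) []).set (2*m) c)
  let g := g.set (2*j) ((g.getD (2*j) []).set (2*m+1) c)
  g.set (2*j) ((g.getD (2*j) []).set (2*m) c)

lemma pvBodyA_cast (a : List String) (m : Nat) (g : List (List Char)) (j : Nat) :
    bodyA a (m : Int) g (j : Int) = pvBody a m g j := by
  simp only [bodyA, pvBody, show ((2*(j:Int)+1).toNat = 2*j+1) from by omega,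
    show ((2*(j:Int)).toNat = 2*j) from by omega,
    show ((2*(m:Int)+1).toNat = 2*m+1) from by omega,
    show ((2*(m:Int)).toNat = 2*m) from by omega]

lemma pvExpand_length (P : List (List Char)) : (pvExpand P).length = 2 * P.length := by
  induction P with
  | nil => rfl
  | cons r P ih => simp [pvExpand] at ih ⊢; omega

lemma pvExpand_replicate (n : Nat) (r : List Char) :
    pvExpand (List.replicate n r) = List.replicate (2*n) r := by
  induction n with
  | zero => rfl
  | succ n ih =>
    rw [List.replicate_succ, show 2*(n+1) = (2*n)+1+1 from by omega,
      List.replicate_succ, List.replicate_succ]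
    simp only [pvExpand, List.flatMap_cons] at ih ⊢
    rw [ih]; rfl

lemma pvBody_at (a : List String) (m t : Nat) (E : List (List Char)) (r : List Char)
    (rest : List (List Char)) (hE : E.length = 2*t) :
    pvBody a m (E ++ r :: r :: rest) t
      = E ++ pvUpd (pyAt a m t) (2*m) r :: pvUpd (pyAt a m t) (2*m) r :: rest := by
  simp only [pvBody, pvUpd]
  rw [List.getD_append_right _ _ _ _ (by omega), List.set_append_right _ _ (by omega)]
  simp only [hE, show 2*t+1-2*t = 1 from by omega, List.getD_cons_succ, List.getD_cons_zero, List.set]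
  rw [List.getD_append_right _ _ _ _ (by omega), List.set_append_right _ _ (by omega)]
  simp only [hE, show 2*t+1-2*t = 1 from by omega, List.getD_cons_succ, List.getD_cons_zero, List.set]
  rw [List.getD_append_right _ _ _ _ (by omega), List.set_append_right _ _ (by omega)]
  simp only [hE, Nat.sub_self, List.getD_cons_zero, List.set]
  rw [List.getD_append_right _ _ _ _ (by omega), List.set_append_right _ _ (by omega)]
  simp only [hE, Nat.sub_self, List.getD_cons_zero, List.set]

-- the whole inner j-loop applied to a duplicated grid updates every pair-row once
lemma pvInner (a : List String) (m : Nat) (f : Nat → List Char) :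
    ∀ (k t : Nat) (Q : List (List Char)), Q.length = t →
    (List.range' t k).foldl (pvBody a m) (pvExpand (Q ++ (List.range' t k).map f))
      = pvExpand (Q ++ (List.range' t k).map (fun (j : Nat) => pvUpd (pyAt a m j) (2*m) (f j))) := by
  intro k
  induction k with
  | zero => intro t Q hQ; simp
  | succ k ih =>
    intro t Q hQ
    rw [List.range'_succ]
    simp only [List.map_cons, List.foldl_cons]
    have hE : (pvExpand Q).length = 2*t := by rw [pvExpand_length, hQ]
    have h1 : pvExpand (Q ++ f t :: (List.range' (t+1) k).map f)
        = pvExpand Q ++ f t :: f t :: pvExpand ((List.range' (t+1) k).map f) := by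
      simp [pvExpand]
    rw [h1, pvBody_at a m t _ _ _ hE]
    have h2 : pvExpand Q ++ pvUpd (pyAt a ↑m ↑t) (2*m) (f t) :: pvUpd (pyAt a ↑m ↑t) (2*m) (f t)
          :: pvExpand ((List.range' (t+1) k).map f)
        = pvExpand ((Q ++ [pvUpd (pyAt a ↑m ↑t) (2*m) (f t)]) ++ (List.range' (t+1) k).map f) := by
      simp [pvExpand]
    rw [h2, ih (t+1) _ (by simp [hQ])]
    simp [pvExpand]

lemma pvDbl_length (l : List Char) : (l.flatMap (fun c => [c, c])).length = 2*l.length := by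
  induction l with
  | nil => rfl
  | cons c l ih => simp only [List.flatMap_cons, List.length_append, List.length_cons, ih]; simp; omega

lemma pvRow_succ (a : List String) (H m j : Nat) (hm : m < H) :
    pvUpd (pyAt a m j) (2*m) (pvRow a H m j) = pvRow a H (m+1) j := by
  have hlen : (((List.range m).map (fun i => pyAt a i j)).flatMap (fun c => [c, c])).length = 2*m := by
    rw [pvDbl_length]; simp
  have hrep : List.replicate (2*(H-m)) '.' = '.' :: '.' :: List.replicate (2*(H-(m+1))) ('.' : Char) := by
    rw [show 2*(H-m) = (2*(H-(m+1))) + 1 + 1 from by omega, List.replicate_succ, List.replicate_succ]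
  simp only [pvUpd, pvRow, hrep]
  rw [List.set_append_right _ _ (by omega), hlen, show 2*m+1-2*m = 1 from by omega]
  simp only [List.set]
  rw [List.set_append_right _ _ (by omega), hlen, Nat.sub_self]
  simp only [List.set]
  rw [List.range_succ]
  simp

lemma pvOuter (a : List String) (H W m : Nat) (hm : m ≤ H) :
    (List.range m).foldl (fun g i => (List.range W).foldl (pvBody a i) g)
        (pvExpand ((List.range W).map (fun j => pvRow a H 0 j)))
      = pvExpand ((List.range W).map (fun j => pvRow a H m j)) := by
  induction m with
  | zero => rfl
  | succ m ih =>
    rw [List.range_succ, List.foldl_append, ih (by omega)]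
    simp only [List.foldl_cons, List.foldl_nil, List.range_eq_range']
    have h := pvInner a m (fun j => pvRow a H m j) W 0 [] rfl
    simp only [List.nil_append] at h
    rw [h]
    congr 1
    apply List.map_congr_left
    intro j _
    exact pvRow_succ a H m j (by omega)

lemma pvA_eq (w h_ : Int) (a : List String) :
    rotate_flip_zoom w h_ a
      = (pvExpand ((List.range w.toNat).map (fun j => pvRow a h_.toNat h_.toNat j))).map
          (fun row => String.ofList row) := by
  unfold rotate_flip_zoom
  rw [PySem.List.pyRange_zero h_, PySem.List.pyRange_zero w, PySem.List.pyRange_zero (2*w)]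
  simp only [List.foldl_map, pvBodyA_cast, List.map_map]
  have hinit : (List.range (2*w).toNat).map ((fun (_ : Int) => List.replicate (2*h_).toNat ('.' : Char)) ∘ (fun (k : Nat) => (k : Int)))
      = pvExpand ((List.range w.toNat).map (fun j => pvRow a h_.toNat 0 j)) := by
    have h1 : ∀ j : Nat, pvRow a h_.toNat 0 j = List.replicate (2*h_.toNat) '.' := by
      intro j; simp [pvRow]
    simp only [h1, Function.comp_def, List.map_const', List.length_range, pvExpand_replicate]
    rw [show (2*w).toNat = 2*w.toNat from by omega, show (2*h_).toNat = 2*h_.toNat from by omega]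
  rw [hinit]
  exact congrArg _ (pvOuter a h_.toNat w.toNat h_.toNat le_rfl)

lemma pvB_eq (w h_ : Int) (a : List String) :
    rotate_flip_zoom_alt w h_ a
      = (List.range w.toNat).flatMap (fun j =>
          [String.ofList (pvRow a h_.toNat h_.toNat j), String.ofList (pvRow a h_.toNat h_.toNat j)]) := by
  unfold rotate_flip_zoom_alt
  rw [PySem.List.pyRange_zero w]
  simp only [List.foldl_map]
  rw [PySem.List.foldl_append_eq_flatMap]
  rw [List.nil_append]
  apply List.flatMap_congr
  intro j _
  have h : (PySem.List.pyRange 0 h_ 1).flatMap (fun i => [pyAt a i (j:Int), pyAt a i (j:Int)])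
      = pvRow a h_.toNat h_.toNat j := by
    rw [PySem.List.pyRange_zero h_]
    simp [pvRow, List.flatMap_map, List.flatMap_assoc]
  simp only [h]

-- ===== VERDICT (by name: the statement is the Claim_ definition above) =====
theorem rotate_flip_zoom_spec : Claim_equal_rotate_flip_zoom := by
  intro w h_ a _ _
  unfold Spec_rotate_flip_zoom
  rw [pvA_eq, pvB_eq]
  simp [pvExpand, List.map_flatMap, List.flatMap_map]
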